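-- pv_equiv track=rewrite | github.com/melissafasol/taini_main | prepare_files_functions.py | find_index_jumps
-- ===== SOURCE A (Python) =====
-- def find_index_jumps(all_indices):
--     #now find where these indices jump into separate epochs
--     epoch_indices = []
--     starting_index = all_indices[0]
--
--     for epoch_index in range(len(all_indices)-1):
--         if all_indices[epoch_index] + 1 != all_indices[epoch_index +1]:
--             epoch_indices.append([starting_index, all_indices[epoch_index]])
--             starting_index = all_indices[epoch_index+1]
--
--     #need to append the last value outside of the loop as loop is for len -1
--     epoch_indices.append([starting_index, all_indices[-1]])
--
--     return epoch_indices
-- ===== SOURCE B (Python) =====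
-- def find_index_jumps(all_indices):
--     breaks = [i for i in range(len(all_indices) - 1)
--               if all_indices[i] + 1 != all_indices[i + 1]]
--     starts = [all_indices[0]] + [all_indices[i + 1] for i in breaks]
--     ends = [all_indices[i] for i in breaks] + [all_indices[-1]]
--     return [[s, e] for s, e in zip(starts, ends)]
-- ===== Notes on version B (the rewrite author's own statement) =====
-- stated objective: alternative
-- what changed: Replaces A's accumulator-threaded single pass (carrying a mutable starting_index and growing the result inside the loop) by a two-phase computation: first find all break positions, then assemble the run starts and ends from them and zip them together.
import Mathlib
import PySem

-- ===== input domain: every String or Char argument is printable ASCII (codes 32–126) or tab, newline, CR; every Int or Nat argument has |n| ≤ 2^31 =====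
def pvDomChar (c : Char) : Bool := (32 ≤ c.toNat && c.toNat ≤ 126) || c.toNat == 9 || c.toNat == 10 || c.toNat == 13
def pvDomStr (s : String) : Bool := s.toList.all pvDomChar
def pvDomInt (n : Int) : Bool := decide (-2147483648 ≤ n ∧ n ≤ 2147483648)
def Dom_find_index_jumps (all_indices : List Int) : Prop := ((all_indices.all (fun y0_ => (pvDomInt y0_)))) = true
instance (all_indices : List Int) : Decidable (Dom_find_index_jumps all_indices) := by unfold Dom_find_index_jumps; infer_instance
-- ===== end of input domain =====

-- B replaces A's accumulator-threaded loop by a find-breaks-then-assemble two-phase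
-- computation (objective: alternative decomposition, same O(n) cost).

-- ===== PORT A =====
-- A's single pass: state = (epoch_indices, starting_index); append a run at each jump.
def find_index_jumps (all_indices : List Int) : List (List Int) :=
  let starting_index : Int := (PySem.List.pyGet? all_indices 0).getD 0
  let st := (PySem.List.pyRange 0 ((all_indices.length : Int) - 1) 1).foldl
    (fun (st : List (List Int) × Int) epoch_index =>
      if (PySem.List.pyGet? all_indices epoch_index).getD 0 + 1
           ≠ (PySem.List.pyGet? all_indices (epoch_index + 1)).getD 0 then
        (st.1 ++ [[st.2, (PySem.List.pyGet? all_indices epoch_index).getD 0]],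
         (PySem.List.pyGet? all_indices (epoch_index + 1)).getD 0)
      else st)
    ([], starting_index)
  st.1 ++ [[st.2, (PySem.List.pyGet? all_indices (-1)).getD 0]]

-- ===== PORT B =====
-- B's two phases: break positions first, then starts/ends assembled and zipped.
def find_index_jumps_alt (all_indices : List Int) : List (List Int) :=
  let breaks := (PySem.List.pyRange 0 ((all_indices.length : Int) - 1) 1).filter
    (fun i => decide ((PySem.List.pyGet? all_indices i).getD 0 + 1
                        ≠ (PySem.List.pyGet? all_indices (i + 1)).getD 0))
  let starts := (PySem.List.pyGet? all_indices 0).getD 0 ::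
    breaks.map (fun i => (PySem.List.pyGet? all_indices (i + 1)).getD 0)
  let ends := breaks.map (fun i => (PySem.List.pyGet? all_indices i).getD 0)
    ++ [(PySem.List.pyGet? all_indices (-1)).getD 0]
  (starts.zip ends).map (fun p => [p.1, p.2])

-- ===== PRECONDITION & SPEC =====
-- A raises IndexError on the empty list (all_indices[0]); B raises there too.
def Pre_find_index_jumps (all_indices : List Int) : Prop := all_indices ≠ []
instance (all_indices : List Int) : Decidable (Pre_find_index_jumps all_indices) := by unfold Pre_find_index_jumps; infer_instance
def pvWitness_find_index_jumps : List Int := [1, 2, 5]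
def Spec_find_index_jumps (all_indices : List Int) (out : List (List Int)) : Prop := out = find_index_jumps_alt all_indices
instance (all_indices : List Int) (out : List (List Int)) : Decidable (Spec_find_index_jumps all_indices out) := by unfold Spec_find_index_jumps; infer_instance

-- ===== CLAIM (what is proved, stated in full; the proofs are below) =====
def Claim_equal_find_index_jumps : Prop := ∀ (all_indices : List Int), Dom_find_index_jumps all_indices → Pre_find_index_jumps all_indices → Spec_find_index_jumps all_indices (find_index_jumps all_indices)

-- ===== LEMMAS AND PROOFS =====

-- Invariant of A's fold over any index list L: the accumulated runs are exactly the
-- zip of (current start :: next-of-breaks) with current-of-breaks, and the carried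
-- start is the last element of the starts list.
theorem fold_invariant (xs : List Int) (L : List Int) :
    ∀ (acc : List (List Int)) (s : Int),
    L.foldl
      (fun (st : List (List Int) × Int) i =>
        if (PySem.List.pyGet? xs i).getD 0 + 1 ≠ (PySem.List.pyGet? xs (i + 1)).getD 0 then
          (st.1 ++ [[st.2, (PySem.List.pyGet? xs i).getD 0]],
           (PySem.List.pyGet? xs (i + 1)).getD 0)
        else st)
      (acc, s)
    = (acc ++ ((s :: (L.filter (fun i => decide ((PySem.List.pyGet? xs i).getD 0 + 1
                        ≠ (PySem.List.pyGet? xs (i + 1)).getD 0))).map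
                  (fun i => (PySem.List.pyGet? xs (i + 1)).getD 0)).zip
               ((L.filter (fun i => decide ((PySem.List.pyGet? xs i).getD 0 + 1
                        ≠ (PySem.List.pyGet? xs (i + 1)).getD 0))).map
                  (fun i => (PySem.List.pyGet? xs i).getD 0))).map (fun p => [p.1, p.2]),
       ((L.filter (fun i => decide ((PySem.List.pyGet? xs i).getD 0 + 1
                        ≠ (PySem.List.pyGet? xs (i + 1)).getD 0))).map
          (fun i => (PySem.List.pyGet? xs (i + 1)).getD 0)).getLastD s) := by
  induction L with
  | nil => intro acc s; simp
  | cons h t ih =>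
    intro acc s
    by_cases hc : (PySem.List.pyGet? xs h).getD 0 + 1 ≠ (PySem.List.pyGet? xs (h + 1)).getD 0
    · simp only [List.foldl_cons, if_pos hc, List.filter_cons, decide_eq_true hc,
        if_pos trivial]
      rw [ih]
      simp only [List.map_cons, List.zip_cons_cons, List.getLastD_cons,
        List.append_assoc, List.cons_append, List.nil_append]
    · simp only [List.foldl_cons, if_neg hc, List.filter_cons]
      rw [decide_eq_false hc]
      simp only [Bool.false_eq_true, if_false]
      exact ih acc s

-- Appending the final run [last start, xs[-1]] equals zipping with ends ++ [xs[-1]].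
theorem zip_snoc (f : Int × Int → List Int) (x : Int) :
    ∀ (bs ms : List Int) (s : Int), ms.length = bs.length →
    (((s :: ms).zip bs).map f) ++ [f (ms.getLastD s, x)]
      = ((s :: ms).zip (bs ++ [x])).map f := by
  intro bs
  induction bs with
  | nil => intro ms s h; simp at h; simp [h]
  | cons b bt ih =>
    intro ms s h
    cases ms with
    | nil => simp at h
    | cons m mt =>
      simp only [List.zip_cons_cons, List.map_cons, List.cons_append, List.getLastD_cons]
      rw [← ih mt m (by simpa using h)]

-- ===== VERDICT (by name: the statement is the Claim_ definition above) =====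
theorem find_index_jumps_spec : Claim_equal_find_index_jumps := by
  intro xs _ _
  unfold Spec_find_index_jumps find_index_jumps find_index_jumps_alt
  simp only []
  rw [fold_invariant]
  simp only [List.nil_append]
  exact zip_snoc (fun p => [p.1, p.2]) ((PySem.List.pyGet? xs (-1)).getD 0) _ _ _
    (by simp)
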